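-- pv_equiv track=rewrite | github.com/LuTianTian001/openclaw-model-admin | server.py | _iter_balanced_json_slices
-- ===== SOURCE A (Python) =====
-- def _iter_balanced_json_slices(text: str):
--     """从文本中依次切出顶层 {...} 片段（不跨字符串转义，仅适用于 CLI 输出场景）。"""
--     n = len(text)
--     i = 0
--     while i < n:
--         start = text.find("{", i)
--         if start < 0:
--             return
--         depth = 0
--         for j in range(start, n):
--             c = text[j]
--             if c == "{":
--                 depth += 1
--             elif c == "}":
--                 depth -= 1
--                 if depth == 0:
--                     yield text[start : j + 1]
--                     i = j + 1
--                     break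
--         else:
--             return
-- ===== SOURCE B (Python) =====
-- def _iter_balanced_json_slices(text: str):
--     """Single flat pass: build each top-level {...} slice char by char with a depth counter."""
--     depth = 0
--     buf = []
--     for c in text:
--         if c == "{":
--             depth += 1
--             buf.append(c)
--         elif c == "}":
--             if depth:
--                 buf.append(c)
--                 depth -= 1
--                 if depth == 0:
--                     yield "".join(buf)
--                     buf = []
--         elif depth:
--             buf.append(c)
-- ===== Notes on version B (the rewrite author's own statement) =====
-- stated objective: alternative
-- what changed: A repeatedly calls find('{') and rescans with an inner indexed loop, yielding slices by index arithmetic; B is a single structural pass over the characters that maintains a depth counter and builds each top-level {...} slice char by char in a buffer.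
import Mathlib
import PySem

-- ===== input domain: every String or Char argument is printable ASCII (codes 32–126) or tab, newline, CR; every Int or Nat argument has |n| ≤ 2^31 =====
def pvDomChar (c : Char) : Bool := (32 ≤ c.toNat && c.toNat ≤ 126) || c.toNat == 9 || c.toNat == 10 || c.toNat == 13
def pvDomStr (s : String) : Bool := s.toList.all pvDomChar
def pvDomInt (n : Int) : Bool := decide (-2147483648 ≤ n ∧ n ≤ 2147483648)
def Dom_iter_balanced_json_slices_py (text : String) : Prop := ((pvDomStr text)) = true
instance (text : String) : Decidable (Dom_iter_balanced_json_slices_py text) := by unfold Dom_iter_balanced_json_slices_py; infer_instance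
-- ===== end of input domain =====

-- B is a different decomposition, not claimed faster: a single structural pass that builds each
-- top-level {...} slice character by character, instead of A's find-then-rescan with index slicing.

-- ===== PORT A =====
-- inner 'for j in range(start, n)' loop of A: returns the index j at which depth returns to 0
-- (the 'break'), or none when the loop runs off the end (the for-else 'return').
-- fuel = number of remaining iterations (n - start at the call site), a pure totality guard.
def pvInnerA (cs : List Char) : Nat → Nat → Int → Option Nat
  | 0, _, _ => none
  | fuel+1, j, depth =>
    if h : j < cs.length then
      let c := cs[j]
      if c = '{' then pvInnerA cs fuel (j+1) (depth+1)
      else if c = '}' then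
        if depth - 1 = 0 then some j else pvInnerA cs fuel (j+1) (depth-1)
      else pvInnerA cs fuel (j+1) depth
    else none

-- outer 'while i < n' loop of A; fuel = n + 1 at the call site (i strictly grows), a pure guard.
def pvOuterA (cs : List Char) : Nat → Nat → List String
  | 0, _ => []
  | fuel+1, i =>
    if i < cs.length then
      let start := PySem.Chars.findFrom cs ['{'] (i : Int) none
      if start < 0 then []
      else
        match pvInnerA cs (cs.length - start.toNat) start.toNat 0 with
        | some j =>
            String.mk (PySem.List.slice cs (some start) (some ((j : Int) + 1))) :: pvOuterA cs fuel (j+1)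
        | none => []
    else []

def iter_balanced_json_slices_py (text : String) : List String :=
  pvOuterA text.toList (text.toList.length + 1) 0

-- ===== PORT B =====
-- single pass: depth counter plus the buffer of the top-level slice being built
def pvLoopB (cs : List Char) (depth : Nat) (buf : List Char) : List String :=
  match cs with
  | [] => []
  | c :: rest =>
    if c = '{' then pvLoopB rest (depth+1) (buf ++ [c])
    else if c = '}' then
      if depth ≠ 0 then
        if depth - 1 = 0 then String.mk (buf ++ [c]) :: pvLoopB rest 0 []
        else pvLoopB rest (depth-1) (buf ++ [c])
      else pvLoopB rest depth buf
    else if depth ≠ 0 then pvLoopB rest depth (buf ++ [c]) else pvLoopB rest depth buf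

def iter_balanced_json_slices_py_alt (text : String) : List String := pvLoopB text.toList 0 []

-- ===== PRECONDITION & SPEC =====
def Spec_iter_balanced_json_slices_py (text : String) (out : List String) : Prop := out = iter_balanced_json_slices_py_alt text
instance (text : String) (out : List String) : Decidable (Spec_iter_balanced_json_slices_py text out) := by unfold Spec_iter_balanced_json_slices_py; infer_instance

-- ===== CLAIM (what is proved, stated in full; the proofs are below) =====
def Claim_equal_iter_balanced_json_slices_py : Prop := ∀ (text : String), Dom_iter_balanced_json_slices_py text → Spec_iter_balanced_json_slices_py text (iter_balanced_json_slices_py text)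

-- ===== LEMMAS AND PROOFS =====

-- the common skeleton: scanning cs at depth d ≥ 1, split off the prefix ending at the char that
-- brings the depth back to 0 (none if the depth never returns to 0)
def pvClose : List Char → Nat → Option (List Char × List Char)
  | [], _ => none
  | c :: rest, d =>
    if c = '}' then
      if d = 1 then some ([c], rest)
      else (pvClose rest (d-1)).map (fun p => (c :: p.1, p.2))
    else if c = '{' then (pvClose rest (d+1)).map (fun p => (c :: p.1, p.2))
    else (pvClose rest d).map (fun p => (c :: p.1, p.2))

theorem pvClose_append (ds : List Char) (d : Nat) (t r : List Char)
    (h : pvClose ds d = some (t, r)) : ds = t ++ r := by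
  induction ds generalizing d t r with
  | nil => simp [pvClose] at h
  | cons c rest ih =>
    simp only [pvClose] at h
    split_ifs at h with h1 h2 h3
    · simp at h; simp [h1, h.1.symm, h.2.symm]
    · rcases Option.map_eq_some_iff.1 h with ⟨⟨t', r'⟩, hc, he⟩
      simp at he; rw [← he.1, ← he.2]; simp [ih _ _ _ hc]
    · rcases Option.map_eq_some_iff.1 h with ⟨⟨t', r'⟩, hc, he⟩
      simp at he; rw [← he.1, ← he.2]; simp [ih _ _ _ hc]
    · rcases Option.map_eq_some_iff.1 h with ⟨⟨t', r'⟩, hc, he⟩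
      simp at he; rw [← he.1, ← he.2]; simp [ih _ _ _ hc]

-- B inside an object: the buffer-building loop, described by pvClose
theorem pvLoopB_close (ds : List Char) (d : Nat) (buf : List Char) (hd : 1 ≤ d) :
    pvLoopB ds d buf =
      match pvClose ds d with
      | some (t, r) => String.mk (buf ++ t) :: pvLoopB r 0 []
      | none => [] := by
  induction ds generalizing d buf with
  | nil => simp [pvLoopB, pvClose]
  | cons c rest ih =>
    by_cases h1 : c = '{'
    · subst h1
      simp only [pvLoopB, pvClose, if_pos rfl, reduceIte]
      rw [ih (d+1) _ (by omega)]
      cases hc : pvClose rest (d+1) with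
      | none => simp
      | some p => cases p; simp
    · by_cases h2 : c = '}'
      · subst h2
        by_cases h3 : d = 1
        · subst h3
          simp [pvLoopB, pvClose]
        · simp only [pvLoopB, pvClose, if_neg h1, if_pos rfl, if_neg h3,
            if_pos (by omega : d ≠ 0), reduceIte, if_neg (by omega : ¬ d - 1 = 0)]
          rw [ih (d-1) _ (by omega)]
          cases hc : pvClose rest (d-1) with
          | none => simp
          | some p => cases p; simp
      · simp only [pvLoopB, pvClose, if_neg h1, if_neg h2, if_pos (by omega : d ≠ 0), reduceIte]
        rw [ih d _ hd]
        cases hc : pvClose rest d with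
        | none => simp
        | some p => cases p; simp

-- B at depth 0 ignores everything outside braces
theorem pvLoopB_no_brace (ds : List Char) (buf : List Char) (h : '{' ∉ ds) :
    pvLoopB ds 0 buf = [] := by
  induction ds generalizing buf with
  | nil => rfl
  | cons c rest ih =>
    simp only [List.mem_cons, not_or] at h
    simp only [pvLoopB, if_neg (fun e => h.1 (Eq.symm e))]
    split_ifs <;> first | exact ih _ h.2 | (exfalso; omega)

theorem pvLoopB_skip (pre cs : List Char) (buf : List Char) (h : '{' ∉ pre) :
    pvLoopB (pre ++ cs) 0 buf = pvLoopB cs 0 buf := by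
  induction pre generalizing buf with
  | nil => rfl
  | cons c rest ih =>
    simp only [List.mem_cons, not_or] at h
    simp only [List.cons_append, pvLoopB, if_neg (fun e => h.1 (Eq.symm e))]
    split_ifs <;> first | exact ih _ h.2 | (exfalso; omega)

-- A's inner scan, described by pvClose
theorem pvInnerA_close (ds : List Char) (cs : List Char) (j : Nat) (d : Nat) (fuel : Nat)
    (hds : cs.drop j = ds) (hd : 1 ≤ d) (hfuel : cs.length - j ≤ fuel) :
    pvInnerA cs fuel j (d : Int) = (pvClose ds d).map (fun p => j + p.1.length - 1) := by
  induction ds generalizing j d fuel with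
  | nil =>
    have hj : ¬ j < cs.length := by
      intro h
      have := List.drop_eq_getElem_cons h
      rw [hds] at this; simp at this; omega
    cases fuel <;> simp [pvInnerA, hj, pvClose]
  | cons c rest ih =>
    have hj : j < cs.length := by
      by_contra h
      rw [List.drop_eq_nil_of_le (by omega)] at hds; simp at hds
    obtain ⟨f', rfl⟩ : ∃ f', fuel = f' + 1 := ⟨fuel - 1, by omega⟩
    have hf' : cs.length - (j+1) ≤ f' := by omega
    have hget : cs[j] = c := by
      have := List.drop_eq_getElem_cons hj
      rw [hds] at this; exact (List.cons.injEq .. ▸ this).1.symm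
    have hdrop : cs.drop (j+1) = rest := by
      rw [← List.tail_drop, hds]; rfl
    by_cases h1 : c = '{'
    · subst h1
      rw [pvInnerA, dif_pos hj, hget]
      simp only [if_pos rfl]
      rw [show (d : Int) + 1 = ((d+1 : Nat) : Int) by push_cast; ring]
      rw [ih (j+1) (d+1) f' hdrop (by omega) hf']
      simp only [pvClose, reduceIte]
      cases hc : pvClose rest (d+1) with
      | none => simp
      | some p => cases p with | mk t r => simp <;> omega
    · by_cases h2 : c = '}'
      · subst h2
        rw [pvInnerA, dif_pos hj, hget]
        simp only [if_neg (by decide : ¬ ('}' = '{')), if_pos rfl]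
        by_cases h3 : d = 1
        · subst h3
          simp [pvClose]
        · rw [if_neg (by omega : ¬ (d : Int) - 1 = 0)]
          rw [show (d : Int) - 1 = ((d-1 : Nat) : Int) by omega]
          rw [ih (j+1) (d-1) f' hdrop (by omega) hf']
          simp only [pvClose, if_pos rfl, if_neg h3]
          cases hc : pvClose rest (d-1) with
          | none => simp
          | some p => cases p with | mk t r => simp <;> omega
      · rw [pvInnerA, dif_pos hj, hget]
        rw [if_neg h1, if_neg h2]
        rw [ih (j+1) d f' hdrop hd hf']
        simp only [pvClose, if_neg h2, if_neg h1]
        cases hc : pvClose rest d with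
        | none => simp
        | some p => cases p with | mk t r => simp <;> omega

theorem pvSingleton_infix (a : Char) (l : List Char) : [a] <:+: l ↔ a ∈ l := by
  constructor
  · intro h; exact h.subset (by simp)
  · intro h; rcases List.append_of_mem h with ⟨s, t, rfl⟩; exact ⟨s, t, by simp⟩

theorem pvOuterA_eq (cs : List Char) (i fuel : Nat) (hfuel : cs.length - i < fuel) :
    pvOuterA cs fuel i = pvLoopB (cs.drop i) 0 [] := by
  induction fuel generalizing i with
  | zero => omega
  | succ fuel ih =>
  by_cases hi : i < cs.length
  · by_cases hneg : PySem.Chars.findFrom cs ['{'] (i : Int) none < 0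
    · have hm1 : PySem.Chars.findFrom cs ['{'] (i : Int) none = -1 := by
        rw [PySem.Chars.findFrom_natCast cs ['{'] i (by omega)] at hneg ⊢
        have := PySem.Chars.neg_one_le_find (cs.drop i) ['{']
        split_ifs at hneg ⊢ with h
        · rfl
        · omega
      have hnb : '{' ∉ cs.drop i := by
        intro hm
        have h2 := (PySem.Chars.findFrom_natCast_eq_neg_one_iff cs ['{'] i (by omega)).1 hm1
        exact h2 ((pvSingleton_infix _ _).2 hm)
      rw [pvOuterA, if_pos hi, if_pos hneg, pvLoopB_no_brace _ _ hnb]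
    · set f := PySem.Chars.findFrom cs ['{'] (i : Int) none with hfdef
      obtain ⟨hif, hpre, hmin⟩ := PySem.Chars.findFrom_natCast_spec cs ['{'] i (by omega) (by omega)
      have h0f : (0:Int) ≤ f := by omega
      set s := f.toNat with hs
      have his : i ≤ s := by omega
      obtain ⟨rest, hrest⟩ : ∃ rest, cs.drop s = '{' :: rest := by
        rcases hpre with ⟨t, ht⟩
        exact ⟨t, by rw [← ht]; rfl⟩
      have hslen : s < cs.length := by
        by_contra h; rw [List.drop_eq_nil_of_le (by omega)] at hrest; simp at hrest
      -- the stretch scanned over by find contains no '{'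
      have hsplit : cs.drop i = (cs.drop i).take (s - i) ++ cs.drop s := by
        conv_lhs => rw [← List.take_append_drop (s - i) (cs.drop i)]
        rw [List.drop_drop]
        congr 2
        omega
      have hnpre : '{' ∉ (cs.drop i).take (s - i) := by
        intro hm
        rcases List.mem_iff_getElem.1 hm with ⟨m, hmlt, hmeq⟩
        have hm2 : m < s - i := lt_of_lt_of_le hmlt (by simpa using List.length_take_le _ _)
        have hmlen : m < (cs.drop i).length := lt_of_lt_of_le hmlt (by simp)
        have hval : (cs.drop i)[m] = '{' := by
          rw [← hmeq]; simp [List.getElem_take]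
        have hdm : (cs.drop i).drop m = '{' :: (cs.drop i).drop (m+1) := by
          rw [List.drop_eq_getElem_cons hmlen, hval]
        have hpref : ['{'] <+: cs.drop (i + m) := by
          rw [← List.drop_drop, hdm]
          exact ⟨_, rfl⟩
        exact hmin (i + m) (by omega) (by omega) hpref
      -- B side
      have hB : pvLoopB (cs.drop i) 0 [] =
          match pvClose rest 1 with
          | some (t, r) => String.mk ('{' :: t) :: pvLoopB r 0 []
          | none => [] := by
        rw [hsplit, pvLoopB_skip _ _ _ hnpre, hrest]
        have : pvLoopB ('{' :: rest) 0 [] = pvLoopB rest 1 ['{'] := by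
          simp [pvLoopB]
        rw [this, pvLoopB_close rest 1 ['{'] (by omega)]
        rfl
      -- A side: the inner scan
      have hcget : cs[s] = '{' := by
        have h := List.drop_eq_getElem_cons hslen
        rw [hrest] at h
        exact (List.cons.injEq .. ▸ h).1.symm
      have hdrop1 : cs.drop (s+1) = rest := by rw [← List.tail_drop, hrest]; rfl
      obtain ⟨fi, hfi'⟩ : ∃ fi, cs.length - s = fi + 1 := ⟨cs.length - s - 1, by omega⟩
      have hInner : pvInnerA cs (cs.length - s) s 0 =
          (pvClose rest 1).map (fun p => s + 1 + p.1.length - 1) := by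
        rw [hfi', pvInnerA, dif_pos hslen, hcget, if_pos rfl,
          show (0:Int) + 1 = ((1:Nat) : Int) by norm_num]
        exact pvInnerA_close rest cs (s+1) 1 fi hdrop1 (by omega) (by omega)
      rw [pvOuterA, if_pos hi, if_neg hneg, hB]
      cases hc : pvClose rest 1 with
      | none =>
        rw [hc] at hInner; simp at hInner
        split
        · next j heq => rw [← hfdef, ← hs, hInner] at heq; simp at heq
        · rfl
      | some p =>
        cases p with | mk t r =>
        rw [hc] at hInner; simp at hInner
        have htr : rest = t ++ r := pvClose_append _ _ _ _ hc
        split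
        · next j heq =>
          rw [← hfdef, ← hs, hInner] at heq
          have hjval : j = s + t.length := by
            injection heq with hh
            omega
          subst hjval
          have hfi : f = (s : Int) := by omega
          congr 1
          · -- the slice equals '{' :: t
            rw [← hfdef, hfi]
            rw [show ((s + t.length : Nat) : Int) + 1 = ((s + t.length + 1 : Nat) : Int) by push_cast; ring]
            rw [PySem.List.slice_natCast]
            rw [show s + t.length + 1 - s = t.length + 1 by omega]
            rw [hrest, htr, List.take_succ_cons, List.take_left]
          · -- the tail: recurse
            rw [ih (s + t.length + 1) (by omega)]
            congr 1
            rw [show s + t.length + 1 = (s + 1) + t.length by omega, ← List.drop_drop, hdrop1,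
              htr, List.drop_left]
        · next heq =>
          rw [← hfdef, ← hs, hInner] at heq; simp at heq
  · rw [pvOuterA, if_neg hi, List.drop_eq_nil_of_le (by omega)]
    rfl

-- ===== VERDICT (by name: the statement is the Claim_ definition above) =====
theorem iter_balanced_json_slices_py_spec : Claim_equal_iter_balanced_json_slices_py := by
  intro text _
  show _ = _
  unfold iter_balanced_json_slices_py iter_balanced_json_slices_py_alt
  simpa using pvOuterA_eq text.toList 0 (text.toList.length + 1) (by omega)
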